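-- pv_equiv track=rewrite | github.com/keiqkeqi321/somnia | open_somnia/config/settings.py | _remove_provider_sections
-- ===== SOURCE A (Python) =====
-- def _section_name(line: str) -> str | None:
--     stripped = line.strip()
--     if stripped.startswith("[") and stripped.endswith("]"):
--         return stripped[1:-1].strip()
--     return None
--
-- def _remove_provider_sections(lines: list[str]) -> list[str]:
--     cleaned: list[str] = []
--     skip_section = False
--     for line in lines:
--         current_section = _section_name(line)
--         if current_section is not None:
--             skip_section = current_section == "providers" or current_section.startswith("providers.")
--         if skip_section:
--             continue
--         cleaned.append(line)
--
--     while cleaned and not cleaned[0].strip():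
--         cleaned.pop(0)
--     while cleaned and not cleaned[-1].strip():
--         cleaned.pop()
--
--     normalized: list[str] = []
--     previous_blank = False
--     for line in cleaned:
--         is_blank = not line.strip()
--         if is_blank and previous_blank:
--             continue
--         normalized.append(line)
--         previous_blank = is_blank
--     return normalized
-- ===== SOURCE B (Python) =====
-- def _remove_provider_sections(lines: list[str]) -> list[str]:
--     # One pass: filter provider sections, trim edges and collapse blank runs
--     # together, holding the first blank of a run in `pending` until a
--     # non-blank line proves it is interior.
--     out: list[str] = []
--     skip_section = False
--     pending = None
--     for line in lines:
--         stripped = line.strip()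
--         if stripped.startswith("[") and stripped.endswith("]"):
--             name = stripped[1:-1].strip()
--             skip_section = name == "providers" or name.startswith("providers.")
--         if skip_section:
--             continue
--         if not stripped:
--             if pending is None:
--                 pending = line
--         else:
--             if out and pending is not None:
--                 out.append(pending)
--             pending = None
--             out.append(line)
--     return out
-- ===== Notes on version B (the rewrite author's own statement) =====
-- stated objective: simpler
-- what changed: Replaces A's four passes (filter, two while-pop edge-trim loops, collapse fold) by a single pass over lines that keeps the first blank of each run in a pending slot and only emits it between non-blank output.
import Mathlib
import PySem

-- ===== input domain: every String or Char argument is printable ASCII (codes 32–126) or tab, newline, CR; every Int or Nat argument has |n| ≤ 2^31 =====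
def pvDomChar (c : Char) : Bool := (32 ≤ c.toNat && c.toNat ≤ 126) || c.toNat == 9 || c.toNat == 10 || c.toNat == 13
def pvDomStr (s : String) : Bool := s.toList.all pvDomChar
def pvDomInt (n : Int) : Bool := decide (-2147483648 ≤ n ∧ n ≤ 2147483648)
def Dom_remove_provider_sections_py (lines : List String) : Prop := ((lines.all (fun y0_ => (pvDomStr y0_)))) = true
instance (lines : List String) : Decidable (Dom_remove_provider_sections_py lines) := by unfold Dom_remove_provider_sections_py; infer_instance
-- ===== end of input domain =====

-- B does A's work (filter provider sections, trim blank edges, collapse blank runs) in a single pass with a pending-blank slot instead of A's four passes; same return values, no speed claim.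

-- ===== PORT A =====
-- _section_name
def pvSectionName (line : String) : Option String :=
  let stripped := PySem.Str.strip line
  if PySem.Str.startswith stripped "[" && PySem.Str.endswith stripped "]" then
    some (PySem.Str.strip (PySem.Str.slice stripped (some 1) (some (-1))))
  else none

-- body of A's first for-loop (state: cleaned, skip_section)
def pvStepA (st : List String × Bool) (line : String) : List String × Bool :=
  let skip' := match pvSectionName line with
    | some cs => cs == "providers" || PySem.Str.startswith cs "providers."
    | none => st.2
  if skip' then (st.1, skip') else (st.1 ++ [line], skip')

-- while cleaned and not cleaned[0].strip(): cleaned.pop(0)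
def pvDropLeadA : List String → List String
  | [] => []
  | l :: ls => if PySem.Str.strip l == "" then pvDropLeadA ls else l :: ls

-- while cleaned and not cleaned[-1].strip(): cleaned.pop()
def pvDropTrailA (r : List String) : List String :=
  match h : r.getLast? with
  | some l => if PySem.Str.strip l == "" then pvDropTrailA r.dropLast else r
  | none => r
termination_by r.length
decreasing_by
  cases r with
  | nil => simp at h
  | cons a as => simp [List.length_dropLast]

-- body of A's second for-loop (state: normalized, previous_blank)
def pvStepCol (st : List String × Bool) (line : String) : List String × Bool :=
  let isBlank := PySem.Str.strip line == ""
  if isBlank && st.2 then st else (st.1 ++ [line], isBlank)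

def remove_provider_sections_py (lines : List String) : List String :=
  let cleaned := (lines.foldl pvStepA ([], false)).1
  let cleaned := pvDropLeadA cleaned
  let cleaned := pvDropTrailA cleaned
  (cleaned.foldl pvStepCol ([], false)).1

-- ===== PORT B =====
-- body of B's single for-loop (state: out, skip_section, pending)
def pvStepB (st : List String × Bool × Option String) (line : String) : List String × Bool × Option String :=
  let (out, skip, pending) := st
  let stripped := PySem.Str.strip line
  let skip' :=
    if PySem.Str.startswith stripped "[" && PySem.Str.endswith stripped "]" then
      let name := PySem.Str.strip (PySem.Str.slice stripped (some 1) (some (-1)))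
      name == "providers" || PySem.Str.startswith name "providers."
    else skip
  if skip' then (out, skip', pending)
  else if stripped == "" then
    (out, skip', if pending.isNone then some line else pending)
  else
    let out' := match pending with
      | some b => if out.isEmpty then out else out ++ [b]
      | none => out
    (out' ++ [line], skip', none)

def remove_provider_sections_py_alt (lines : List String) : List String :=
  (lines.foldl pvStepB ([], false, none)).1

-- ===== PRECONDITION & SPEC =====
def Spec_remove_provider_sections_py (lines : List String) (out : List String) : Prop := out = remove_provider_sections_py_alt lines
instance (lines : List String) (out : List String) : Decidable (Spec_remove_provider_sections_py lines out) := by unfold Spec_remove_provider_sections_py; infer_instance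

-- ===== CLAIM (what is proved, stated in full; the proofs are below) =====
def Claim_equal_remove_provider_sections_py : Prop := ∀ (lines : List String), Dom_remove_provider_sections_py lines → Spec_remove_provider_sections_py lines (remove_provider_sections_py lines)

-- ===== LEMMAS AND PROOFS =====

def pvBlank (l : String) : Bool := PySem.Str.strip l == ""

-- the skip_section update, shared by both step functions
def pvNewSkip (skip : Bool) (line : String) : Bool :=
  match pvSectionName line with
  | some cs => cs == "providers" || PySem.Str.startswith cs "providers."
  | none => skip

-- functional version of the provider filter: (surviving lines, final skip flag)
def pvPairF : List String → Bool → List String × Bool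
  | [], skip => ([], skip)
  | l :: ls, skip =>
    let s' := pvNewSkip skip l
    let rest := pvPairF ls s'
    (if s' then rest.1 else l :: rest.1, rest.2)

-- A's collapse loop, recursively
def pvCol : List String → Bool → List String
  | [], _ => []
  | l :: ls, pb => if pvBlank l && pb then pvCol ls pb else l :: pvCol ls (pvBlank l)

-- B's per-surviving-line processing, recursively
def pvOnep : List String → List String → Option String → List String × Option String
  | [], out, p => (out, p)
  | l :: ls, out, p =>
    if pvBlank l then pvOnep ls out (if p.isNone then some l else p)
    else pvOnep ls ((match p with
      | some b => if out.isEmpty then out else out ++ [b]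
      | none => out) ++ [l]) none

-- what pvOnep appends once out is nonempty
def pvTailF : List String → Option String → List String
  | [], _ => []
  | l :: ls, p =>
    if pvBlank l then pvTailF ls (if p.isNone then some l else p)
    else (match p with
      | some b => b :: l :: pvTailF ls none
      | none => l :: pvTailF ls none)

theorem pvStepA_eq (acc : List String) (skip : Bool) (l : String) :
    pvStepA (acc, skip) l = (if pvNewSkip skip l then acc else acc ++ [l], pvNewSkip skip l) := by
  cases hsn : pvSectionName l with
  | some cs =>
    simp only [pvStepA, pvNewSkip, hsn]
    split <;> rfl
  | none =>
    simp only [pvStepA, pvNewSkip, hsn]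
    split <;> rfl

theorem pvStepCol_eq (acc : List String) (pb : Bool) (l : String) :
    pvStepCol (acc, pb) l = if pvBlank l && pb then (acc, pb) else (acc ++ [l], pvBlank l) := by
  simp only [pvStepCol, pvBlank]

theorem pvStepB_eq (out : List String) (skip : Bool) (p : Option String) (line : String) :
    pvStepB (out, skip, p) line =
      (if pvNewSkip skip line then (out, pvNewSkip skip line, p)
       else if pvBlank line then (out, pvNewSkip skip line, if p.isNone then some line else p)
       else ((match p with
         | some b => if out.isEmpty then out else out ++ [b]
         | none => out) ++ [line], pvNewSkip skip line, none)) := by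
  by_cases hc : (PySem.Str.startswith (PySem.Str.strip line) "[" && PySem.Str.endswith (PySem.Str.strip line) "]") = true
  · simp only [pvStepB, pvNewSkip, pvSectionName, pvBlank, hc, if_true]
  · simp only [Bool.not_eq_true] at hc
    simp only [pvStepB, pvNewSkip, pvSectionName, pvBlank, hc, Bool.false_eq_true, if_false]

theorem pvFoldA_eq (lines : List String) (acc : List String) (skip : Bool) :
    lines.foldl pvStepA (acc, skip) = (acc ++ (pvPairF lines skip).1, (pvPairF lines skip).2) := by
  induction lines generalizing acc skip with
  | nil => simp [pvPairF]
  | cons l ls ih =>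
    rw [List.foldl_cons, pvStepA_eq]
    by_cases h : pvNewSkip skip l = true
    · simp [pvPairF, h, ih]
    · simp [pvPairF, h, ih]

theorem pvFoldCol_eq (c : List String) (acc : List String) (pb : Bool) :
    (c.foldl pvStepCol (acc, pb)).1 = acc ++ pvCol c pb := by
  induction c generalizing acc pb with
  | nil => simp [pvCol]
  | cons l ls ih =>
    rw [List.foldl_cons, pvStepCol_eq]
    by_cases h : (pvBlank l && pb) = true
    · simp [pvCol, h, ih]
    · simp [pvCol, h, ih]

theorem pvFoldB_eq (lines : List String) (out : List String) (skip : Bool) (p : Option String) :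
    lines.foldl pvStepB (out, skip, p) =
      ((pvOnep (pvPairF lines skip).1 out p).1, (pvPairF lines skip).2,
        (pvOnep (pvPairF lines skip).1 out p).2) := by
  induction lines generalizing out skip p with
  | nil => simp [pvPairF, pvOnep]
  | cons l ls ih =>
    rw [List.foldl_cons, pvStepB_eq]
    by_cases h : pvNewSkip skip l = true
    · simp [pvPairF, h, ih]
    · by_cases hb : pvBlank l = true
      · simp [pvPairF, pvOnep, h, hb, ih]
      · simp [pvPairF, pvOnep, h, hb, ih]

theorem pvOnep_ne_nil (r : List String) (out : List String) (p : Option String)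
    (h : out ≠ []) : (pvOnep r out p).1 = out ++ pvTailF r p := by
  induction r generalizing out p with
  | nil => simp [pvOnep, pvTailF]
  | cons l ls ih =>
    by_cases hb : pvBlank l = true
    · simp [pvOnep, pvTailF, hb, ih out _ h]
    · cases p with
      | none =>
        simp [pvOnep, pvTailF, hb, ih (out ++ [l]) none (by simp)]
      | some b =>
        have hi := ih (out ++ [b, l]) none (by simp)
        simp only [List.isEmpty_iff, h] at *
        simp [pvOnep, pvTailF, hb, List.isEmpty_iff, h, hi]

theorem pvDropTrailA_concat (r : List String) (x : String) :
    pvDropTrailA (r ++ [x]) = if pvBlank x then pvDropTrailA r else r ++ [x] := by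
  rw [pvDropTrailA]
  split
  · next l heq =>
    rw [List.getLast?_concat] at heq
    cases heq
    rw [List.dropLast_concat]
    rfl
  · next heq =>
    rw [List.getLast?_concat] at heq
    exact absurd heq (by simp)

theorem pvDropTrailA_eq (r : List String) :
    pvDropTrailA r = (r.reverse.dropWhile pvBlank).reverse := by
  induction r using List.reverseRecOn with
  | nil => simp [pvDropTrailA]
  | append_singleton r x ih =>
    rw [pvDropTrailA_concat]
    by_cases hb : pvBlank x = true
    · simp [hb, ih, List.dropWhile_cons]
    · simp [hb, List.dropWhile_cons]

theorem pvDropTrailA_all_blank (r : List String) (h : ∀ x ∈ r, pvBlank x = true) :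
    pvDropTrailA r = [] := by
  rw [pvDropTrailA_eq]
  have : r.reverse.dropWhile pvBlank = [] := by
    rw [List.dropWhile_eq_nil_iff]
    intro x hx
    exact h x (List.mem_reverse.mp hx)
  simp [this]

theorem pvDropTrailA_cons_any (l : String) (r : List String)
    (h : r.any (fun x => !pvBlank x) = true) :
    pvDropTrailA (l :: r) = l :: pvDropTrailA r := by
  rw [pvDropTrailA_eq, pvDropTrailA_eq]
  have hne : (r.reverse.dropWhile pvBlank) ≠ [] := by
    rw [Ne, List.dropWhile_eq_nil_iff]
    simp only [List.any_eq_true, Bool.not_eq_true'] at h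
    obtain ⟨x, hx, hpx⟩ := h
    intro hall
    have := hall x (List.mem_reverse.mpr hx)
    simp [hpx] at this
  rw [List.reverse_cons, List.dropWhile_append]
  simp [List.isEmpty_iff, hne]

theorem pvDropTrailA_cons_nonblank (x : String) (r : List String) (h : pvBlank x = false) :
    pvDropTrailA (x :: r) = x :: pvDropTrailA r := by
  by_cases ha : r.any (fun y => !pvBlank y) = true
  · exact pvDropTrailA_cons_any x r ha
  · have hall : ∀ y ∈ r, pvBlank y = true := by
      simp only [Bool.not_eq_true, List.any_eq_true] at ha
      push_neg at ha
      intro y hy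
      have := ha y hy
      simpa using this
    rw [pvDropTrailA_all_blank r hall, pvDropTrailA_eq]
    have hrev : ∀ y ∈ r.reverse, pvBlank y = true := fun y hy => hall y (List.mem_reverse.mp hy)
    have h1 : r.reverse.dropWhile pvBlank = [] := by
      rw [List.dropWhile_eq_nil_iff]; exact hrev
    rw [List.reverse_cons, List.dropWhile_append]
    simp [h1, h]

theorem pvTailF_spec (r : List String) :
    pvTailF r none = pvCol (pvDropTrailA r) false ∧
      ∀ b, pvTailF r (some b) =
        if r.any (fun x => !pvBlank x) then b :: pvCol (pvDropTrailA r) true else [] := by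
  induction r with
  | nil =>
    refine ⟨by simp [pvTailF, pvDropTrailA, pvCol], fun b => by simp [pvTailF]⟩
  | cons l ls ih =>
    obtain ⟨ih1, ih2⟩ := ih
    by_cases hb : pvBlank l = true
    · constructor
      · rw [pvTailF]
        simp only [hb, if_true, Option.isNone_none]
        rw [ih2 l]
        by_cases ha : ls.any (fun x => !pvBlank x) = true
        · rw [if_pos ha, pvDropTrailA_cons_any l ls ha, pvCol]
          simp [hb]
        · rw [if_neg ha]
          have hall : ∀ y ∈ l :: ls, pvBlank y = true := by
            intro y hy
            rcases List.mem_cons.mp hy with h1 | h1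
            · subst h1; exact hb
            · simp only [Bool.not_eq_true, List.any_eq_true] at ha
              push_neg at ha
              simpa using ha y h1
          rw [pvDropTrailA_all_blank _ hall]
          simp [pvCol]
      · intro b
        rw [pvTailF]
        simp only [hb, if_true, Option.isNone_some]
        rw [if_neg (by simp)]
        rw [ih2 b]
        have hany : (l :: ls).any (fun x => !pvBlank x) = ls.any (fun x => !pvBlank x) := by
          simp [hb]
        rw [hany]
        by_cases ha : ls.any (fun x => !pvBlank x) = true
        · rw [if_pos ha, if_pos ha, pvDropTrailA_cons_any l ls ha, pvCol]
          simp [hb]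
        · rw [if_neg ha, if_neg ha]
    · constructor
      · rw [pvTailF]
        simp only [hb, Bool.false_eq_true, if_false]
        rw [ih1, pvDropTrailA_cons_nonblank l ls (by simpa using hb), pvCol]
        simp [hb]
      · intro b
        rw [pvTailF]
        simp only [hb, Bool.false_eq_true, if_false]
        rw [ih1]
        have hany : (l :: ls).any (fun x => !pvBlank x) = true := by
          simp [hb]
        rw [if_pos hany, pvDropTrailA_cons_nonblank l ls (by simpa using hb), pvCol]
        simp [hb]

theorem pvOnep_nil (r : List String) (p : Option String) :
    (pvOnep r [] p).1 = pvCol (pvDropTrailA (pvDropLeadA r)) false := by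
  induction r generalizing p with
  | nil => simp [pvOnep, pvDropLeadA, pvDropTrailA, pvCol]
  | cons l ls ih =>
    by_cases hb : pvBlank l = true
    · have hb' : (PySem.Str.strip l == "") = true := hb
      simp only [pvOnep, hb, if_true]
      rw [ih, pvDropLeadA]
      simp [hb']
    · have hb0 : pvBlank l = false := by simpa using hb
      have hb' : (PySem.Str.strip l == "") = false := hb0
      simp only [pvOnep, hb0, Bool.false_eq_true, if_false]
      have : ((match p with
        | some b => if ([] : List String).isEmpty then ([] : List String) else [] ++ [b]
        | none => ([] : List String)) ++ [l]) = [l] := by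
        cases p <;> simp
      rw [this, pvOnep_ne_nil ls [l] none (by simp), (pvTailF_spec ls).1]
      rw [pvDropLeadA]
      simp only [hb', Bool.false_eq_true, if_false]
      rw [pvDropTrailA_cons_nonblank l ls hb0, pvCol]
      simp [hb0]

-- ===== VERDICT (by name: the statement is the Claim_ definition above) =====
theorem remove_provider_sections_py_spec : Claim_equal_remove_provider_sections_py := by
  intro lines _
  unfold Spec_remove_provider_sections_py
  unfold remove_provider_sections_py remove_provider_sections_py_alt
  rw [pvFoldA_eq, pvFoldB_eq]
  simp only [List.nil_append]
  rw [pvOnep_nil, pvFoldCol_eq]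
  simp
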